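-- pv_equiv track=rewrite | github.com/dc480506/AC_EC | AC_EC (editable)/institutional_coordinator/view_response/bulkUpload/student_preference.py | sameprefrem
-- ===== SOURCE A (Python) =====
-- def sameprefrem(list1):
-- 	cid=''
-- 	for x in range(len(list1)):
-- 		if 'same' not in list1[x]:
-- 			cid=list1[x]
-- 			for y in range((x+1),len(list1)):
-- 				if list1[y] == cid:
-- 					list1[y]='same as pref '+str(x+1)
-- 	return list1
-- ===== SOURCE B (Python) =====
-- def sameprefrem(list1):
--     # Like A, mutates list1 in place and returns it.
--     first = {}
--     for i, v in enumerate(list1):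
--         if 'same' not in v and v not in first:
--             first[v] = i
--     for i, v in enumerate(list1):
--         if 'same' not in v:
--             j = first.get(v)
--             if j is not None and j != i:
--                 list1[i] = 'same as pref ' + str(j + 1)
--     return list1
-- ===== Notes on version B (the rewrite author's own statement) =====
-- stated objective: faster
-- what changed: Replaces A's nested rescan (for each non-'same' element, scan the whole tail and rewrite duplicates in place) by two independent linear passes: one pass builds a dict mapping each value to its first index, a second pass rewrites every later occurrence from that dict.
import Mathlib
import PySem

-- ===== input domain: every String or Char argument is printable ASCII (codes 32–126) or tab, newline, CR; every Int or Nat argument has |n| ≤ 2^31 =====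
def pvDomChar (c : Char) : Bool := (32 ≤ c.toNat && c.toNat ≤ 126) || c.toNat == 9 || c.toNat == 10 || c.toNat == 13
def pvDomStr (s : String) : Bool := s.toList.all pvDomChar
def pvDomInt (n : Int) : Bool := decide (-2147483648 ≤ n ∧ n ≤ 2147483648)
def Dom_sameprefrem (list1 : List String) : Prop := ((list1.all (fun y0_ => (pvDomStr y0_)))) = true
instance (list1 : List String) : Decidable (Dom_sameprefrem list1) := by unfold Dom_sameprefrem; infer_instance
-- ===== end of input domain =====

-- B replaces A's nested tail-rescans by two linear passes over a first-occurrence dict (measurably faster);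
-- both Pythons mutate list1 in place and return it — the equivalence proved here is about the return value.

-- ===== PORT A =====
-- literal port of A: outer loop over indices carrying (list, cid); inner loop rewrites later equal entries in place
def sameprefrem (list1 : List String) : List String :=
  ((List.range list1.length).foldl
    (fun (st : List String × String) x =>
      let l := st.1
      if !PySem.Str.isIn "same" (l.getD x "") then
        let cid := l.getD x ""
        let l' := (List.range' (x + 1) (l.length - (x + 1))).foldl
          (fun (acc : List String) y =>
            if acc.getD y "" = cid then
              acc.set y ("same as pref " ++ PySem.Int.toStr ((x : Int) + 1))
            else acc) l
        (l', cid)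
      else st)
    (list1, "")).1

-- ===== PORT B =====
-- port of B: pass 1 builds the first-occurrence dict; pass 2 rewrites each later occurrence from the dict
def sameprefrem_alt (list1 : List String) : List String :=
  let first : PySem.Dict String Int :=
    (PySem.List.enumerate list1 0).foldl
      (fun d iv =>
        if !PySem.Str.isIn "same" iv.2 && !d.contains iv.2 then d.insert iv.2 iv.1 else d)
      PySem.Dict.empty
  (PySem.List.enumerate list1 0).map
    (fun iv =>
      if !PySem.Str.isIn "same" iv.2 then
        match first.get? iv.2 with
        | some j => if j ≠ iv.1 then "same as pref " ++ PySem.Int.toStr (j + 1) else iv.2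
        | none => iv.2
      else iv.2)

-- ===== PRECONDITION & SPEC =====
def Spec_sameprefrem (list1 : List String) (out : List String) : Prop := out = sameprefrem_alt list1
instance (list1 : List String) (out : List String) : Decidable (Spec_sameprefrem list1 out) := by unfold Spec_sameprefrem; infer_instance

-- ===== CLAIM (what is proved, stated in full; the proofs are below) =====
def Claim_equal_sameprefrem : Prop := ∀ (list1 : List String), Dom_sameprefrem list1 → Spec_sameprefrem list1 (sameprefrem list1)

-- ===== LEMMAS AND PROOFS =====

-- common vocabulary for the proofs
def hasS (v : String) : Bool := PySem.Str.isIn "same" v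

def repl (j : Nat) : String := "same as pref " ++ PySem.Int.toStr ((j : Int) + 1)

-- value of the final (and partial) transforms at index i, given the ORIGINAL list l:
-- entry replaced iff it does not contain 'same' and its first occurrence is strictly before i (and before the cut k)
def specAt (l : List String) (k : Nat) (i : Nat) (v : String) : String :=
  if hasS v then v
  else match PySem.List.index? l v with
    | some j => if j < i ∧ j < k then repl j else v
    | none => v

def part (l : List String) (k : Nat) : List String := l.mapIdx (fun i v => specAt l k i v)

lemma hasS_repl (j : Nat) : hasS (repl j) = true := by
  rw [hasS, repl, PySem.Str.isIn_iff_infix]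
  refine List.IsPrefix.isInfix ?_
  have h : ("same as pref " ++ PySem.Int.toStr ((j : Int) + 1)).toList
      = "same".toList ++ (" as pref ".toList ++ (PySem.Int.toStr ((j : Int) + 1)).toList) := by
    rw [String.toList_append]; rfl
  rw [h]; exact List.prefix_append _ _

lemma repl_ne (j : Nat) (v : String) (hv : hasS v = false) : repl j ≠ v := by
  intro h; rw [← h, hasS_repl j] at hv; cases hv

lemma length_part (l : List String) (k : Nat) : (part l k).length = l.length := by
  simp [part]

lemma part_get? (l : List String) (k i : Nat) :
    (part l k)[i]? = Option.map (specAt l k i) l[i]? := by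
  simp [part, List.getElem?_mapIdx]

lemma part_zero (l : List String) : part l 0 = l := by
  apply List.ext_getElem?
  intro i
  rw [part_get?]
  cases h : l[i]? with
  | none => rfl
  | some v =>
    simp only [Option.map_some]
    congr 1
    unfold specAt
    split
    · rfl
    · cases hj : PySem.List.index? l v with
      | none => rfl
      | some j => simp

-- index? of an element read off the list is at most its position
lemma index?_le (l : List String) (i j : Nat) (v : String) (hv : l[i]? = some v)
    (hj : PySem.List.index? l v = some j) : j ≤ i := by
  obtain ⟨hk, hget, hmin⟩ := PySem.List.getElem_of_index?_eq_some hj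
  by_contra h
  obtain ⟨hi, hival⟩ := List.getElem?_eq_some_iff.mp hv
  exact hmin i (by omega) hival

-- index? is defined at every member read off the list
lemma index?_isSome' (l : List String) (i : Nat) (v : String) (hv : l[i]? = some v) :
    ∃ j, PySem.List.index? l v = some j := by
  have hm : v ∈ l := List.mem_of_getElem? hv
  exact Option.isSome_iff_exists.mp ((PySem.List.index?_isSome_iff l v).mpr hm)

-- the value sitting at index j named by index?
lemma index?_getElem? (l : List String) (j : Nat) (v : String)
    (hj : PySem.List.index? l v = some j) : l[j]? = some v := by
  obtain ⟨hk, hget, _⟩ := PySem.List.getElem_of_index?_eq_some hj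
  rw [List.getElem?_eq_getElem hk, hget]

-- A's inner loop, characterized pointwise against the list it started from
lemma inner_get? (c w : String) (s m : Nat) (L : List String) (hsm : s + m ≤ L.length) (i : Nat) :
    ((List.range' s m).foldl
      (fun (acc : List String) y => if acc.getD y "" = c then acc.set y w else acc) L)[i]? =
    if s ≤ i ∧ i < s + m ∧ L[i]? = some c then some w else L[i]? := by
  induction m generalizing s L with
  | zero =>
    simp only [List.range'_zero, List.foldl_nil]
    rw [if_neg (by omega)]
  | succ m ih =>
    rw [List.range'_succ, List.foldl_cons]
    have hs : s < L.length := by omega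
    have hgd : L.getD s "" = L[s]'hs := by
      rw [List.getD_eq_getElem?_getD, List.getElem?_eq_getElem hs]; rfl
    by_cases hc : L[s]'hs = c
    · rw [if_pos (by rw [hgd, hc])]
      rw [ih (s + 1) _ (by rw [List.length_set]; omega)]
      by_cases hi : i = s
      · subst hi
        rw [if_neg (by omega), List.getElem?_set_self hs,
          if_pos ⟨le_refl _, by omega, by rw [List.getElem?_eq_getElem hs, hc]⟩]
      · rw [List.getElem?_set_ne (by omega)]
        have hiff : (s + 1 ≤ i ∧ i < s + 1 + m ∧ L[i]? = some c) ↔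
            (s ≤ i ∧ i < s + (m + 1) ∧ L[i]? = some c) := by
          constructor <;> rintro ⟨h1, h2, h3⟩ <;> exact ⟨by omega, by omega, h3⟩
        rw [if_congr hiff rfl rfl]
    · rw [if_neg (by rw [hgd]; exact hc)]
      rw [ih (s + 1) _ (by omega)]
      by_cases hi : i = s
      · subst hi
        rw [if_neg (by omega), if_neg (by
          rintro ⟨-, -, h⟩
          rw [List.getElem?_eq_getElem hs] at h
          exact hc (Option.some.inj h))]
      · have hiff : (s + 1 ≤ i ∧ i < s + 1 + m ∧ L[i]? = some c) ↔
            (s ≤ i ∧ i < s + (m + 1) ∧ L[i]? = some c) := by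
          constructor <;> rintro ⟨h1, h2, h3⟩ <;> exact ⟨by omega, by omega, h3⟩
        rw [if_congr hiff rfl rfl]

-- specAt either keeps the value or yields a replacement string
lemma specAt_cases (l : List String) (k i : Nat) (w : String) :
    specAt l k i w = w ∨ ∃ j, specAt l k i w = repl j := by
  unfold specAt
  split
  · exact Or.inl rfl
  · split
    · split
      · exact Or.inr ⟨_, rfl⟩
      · exact Or.inl rfl
    · exact Or.inl rfl

lemma specAt_ne (l : List String) (k i : Nat) (w v : String) (hv : hasS v = false)
    (hwv : w ≠ v) : specAt l k i w ≠ v := by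
  rcases specAt_cases l k i w with h | ⟨j, h⟩ <;> rw [h]
  · exact hwv
  · exact repl_ne j v hv

-- raising the cut does not change an entry whose first occurrence is not at the cut
lemma specAt_succ_of_ne (l : List String) (k i : Nat) (w : String)
    (h : PySem.List.index? l w ≠ some k) : specAt l (k + 1) i w = specAt l k i w := by
  unfold specAt
  split
  · rfl
  · cases hj : PySem.List.index? l w with
    | none => rfl
    | some j =>
      have hjk : j ≠ k := fun he => h (he ▸ hj)
      simp only []
      have : (j < i ∧ j < k + 1) ↔ (j < i ∧ j < k) := by omega
      rw [if_congr this rfl rfl]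

lemma part_succ_eq_of (l : List String) (k : Nat)
    (h : ∀ w, PySem.List.index? l w = some k → hasS w = true) :
    part l (k + 1) = part l k := by
  apply List.ext_getElem?
  intro i
  rw [part_get?, part_get?]
  cases hw : l[i]? with
  | none => rfl
  | some w =>
    simp only [Option.map_some]
    congr 1
    by_cases hjk : PySem.List.index? l w = some k
    · have hS := h w hjk
      unfold specAt
      rw [if_pos hS, if_pos hS]
    · exact specAt_succ_of_ne l k i w hjk

lemma specAt_some (l : List String) (k i : Nat) (w : String) (hS : hasS w = false)
    {j : Nat} (hj : PySem.List.index? l w = some j) :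
    specAt l k i w = if j < i ∧ j < k then repl j else w := by
  unfold specAt; rw [if_neg (by simp [hS]), hj]

-- one outer-loop step sends the k-th partial transform to the (k+1)-st
lemma step_part (l : List String) (k : Nat) (hk : k < l.length) (c : String) :
    (if (!PySem.Str.isIn "same" ((part l k).getD k "")) = true then
        ((List.range' (k + 1) ((part l k).length - (k + 1))).foldl
          (fun (acc : List String) y =>
            if acc.getD y "" = (part l k).getD k "" then
              acc.set y ("same as pref " ++ PySem.Int.toStr ((k : Int) + 1))
            else acc) (part l k),
         (part l k).getD k "")
      else (part l k, c))
    = (part l (k + 1),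
       if hasS ((part l k).getD k "") = false then (part l k).getD k "" else c) := by
  obtain ⟨v, hv⟩ : ∃ v, l[k]? = some v := ⟨_, List.getElem?_eq_getElem hk⟩
  have hcur : (part l k).getD k "" = specAt l k k v := by
    rw [List.getD_eq_getElem?_getD, part_get?, hv]; rfl
  by_cases hS : hasS v = true
  · -- list1[k] contains 'same': skipped, and nothing has its first occurrence revealed at k
    have hcv : (part l k).getD k "" = v := by
      rw [hcur]; unfold specAt; rw [if_pos hS]
    rw [hcv]
    have hguard : (!PySem.Str.isIn "same" v) = false := by
      have : PySem.Str.isIn "same" v = true := hS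
      rw [this]; rfl
    rw [hguard, if_neg (by simp), hS, if_neg (by simp)]
    rw [part_succ_eq_of l k (fun w hw => by
      have := index?_getElem? l k w hw
      rw [hv] at this
      rw [← Option.some.inj this]; exact hS)]
  · have hSf : hasS v = false := by simpa using hS
    obtain ⟨j, hj⟩ := index?_isSome' l k v hv
    have hjk : j ≤ k := index?_le l k j v hv hj
    by_cases hlt : j < k
    · -- a later duplicate, already rewritten to 'same as pref …': skipped
      have hcv : (part l k).getD k "" = repl j := by
        rw [hcur, specAt_some l k k v hSf hj, if_pos ⟨hlt, hlt⟩]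
      rw [hcv]
      have hguard : (!PySem.Str.isIn "same" (repl j)) = false := by
        have : PySem.Str.isIn "same" (repl j) = true := hasS_repl j
        rw [this]; rfl
      rw [hguard, if_neg (by simp), hasS_repl, if_neg (by simp)]
      rw [part_succ_eq_of l k (fun w hw => by
        have := index?_getElem? l k w hw
        rw [hv] at this
        rw [← Option.some.inj this] at hw
        rw [hw] at hj
        exact absurd (Option.some.inj hj) (by omega))]
    · -- first occurrence: the inner loop rewrites every later equal entry
      have hjk' : j = k := by omega
      subst hjk'
      have hcv : (part l j).getD j "" = v := by
        rw [hcur, specAt_some l j j v hSf hj, if_neg (by omega)]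
      rw [hcv]
      have hguard : (!PySem.Str.isIn "same" v) = true := by
        have : PySem.Str.isIn "same" v = false := hSf
        rw [this]; rfl
      rw [hguard, if_pos rfl, hSf, if_pos rfl]
      refine Prod.ext ?_ rfl
      apply List.ext_getElem?
      intro i
      rw [inner_get? v _ (j + 1) _ (part l j) (by rw [length_part]; omega) i, part_get?]
      have hm : j + 1 + ((part l j).length - (j + 1)) = l.length := by
        rw [length_part]; omega
      cases hw : l[i]? with
      | none =>
        have hi : l.length ≤ i := List.getElem?_eq_none_iff.mp hw
        rw [if_neg (by omega), part_get?, hw]; rfl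
      | some w =>
        have hi : i < l.length := (List.getElem?_eq_some_iff.mp hw).1
        rw [part_get?, hw]
        simp only [Option.map_some]
        by_cases hwv : w = v
        · subst hwv
          have hspec : specAt l j i w = w := by
            rw [specAt_some l j i w hSf hj, if_neg (by omega)]
          by_cases hik : j + 1 ≤ i
          · rw [if_pos ⟨hik, by omega, by rw [hspec]⟩]
            congr 1
            rw [specAt_some l (j + 1) i w hSf hj, if_pos ⟨by omega, by omega⟩]
            rfl
          · rw [if_neg (by omega)]
            congr 1
            rw [hspec, specAt_some l (j + 1) i w hSf hj, if_neg (by omega)]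
        · rw [if_neg (by
            rintro ⟨-, -, h3⟩
            exact specAt_ne l j i w v hSf hwv (Option.some.inj h3))]
          congr 1
          refine (specAt_succ_of_ne l j i w (fun hjw => ?_)).symm
          have := index?_getElem? l j w hjw
          rw [index?_getElem? l j v hj] at this
          exact hwv (Option.some.inj this).symm

-- the outer loop maintains 'part'
lemma outer_inv (l : List String) (k : Nat) (hk : k ≤ l.length) :
    ∃ c, (List.range k).foldl
      (fun (st : List String × String) x =>
        let L := st.1
        if !PySem.Str.isIn "same" (L.getD x "") then
          let cid := L.getD x ""
          let l' := (List.range' (x + 1) (L.length - (x + 1))).foldl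
            (fun (acc : List String) y =>
              if acc.getD y "" = cid then
                acc.set y ("same as pref " ++ PySem.Int.toStr ((x : Int) + 1))
              else acc) L
          (l', cid)
        else st) (l, "") = (part l k, c) := by
  induction k with
  | zero => exact ⟨"", by rw [part_zero]; rfl⟩
  | succ k ih =>
    obtain ⟨c, hc⟩ := ih (by omega)
    rw [List.range_succ, List.foldl_append, List.foldl_cons, List.foldl_nil, hc]
    exact ⟨_, step_part l k (by omega) c⟩

lemma sameprefrem_eq_part (l : List String) : sameprefrem l = part l l.length := by
  unfold sameprefrem
  obtain ⟨c, hc⟩ := outer_inv l l.length (le_refl _)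
  rw [hc]

-- B-side: index? under a cons, written as the match the proofs below consume
lemma shift_match (xs : List String) (x v : String) (off : Int) (hvx : v ≠ x) :
    (match PySem.List.index? (x :: xs) v with
      | some j => some (off + (j : Int))
      | none => (none : Option Int)) =
    (match PySem.List.index? xs v with
      | some j => some (off + 1 + (j : Int))
      | none => (none : Option Int)) := by
  rw [PySem.List.index?_cons_of_ne xs (fun h => hvx h.symm)]
  cases PySem.List.index? xs v with
  | none => rfl
  | some j =>
    simp only [Option.map_some]
    congr 1
    push_cast
    ring

-- B-side: the dict built by the first pass, characterized
lemma build_get? (l0 : List String) (off : Int) (d : PySem.Dict String Int) (v : String) :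
    ((PySem.List.enumerate l0 off).foldl
      (fun d iv =>
        if !PySem.Str.isIn "same" iv.2 && !d.contains iv.2 then d.insert iv.2 iv.1 else d)
      d).get? v =
    if d.contains v then d.get? v
    else if hasS v then none
    else match PySem.List.index? l0 v with
      | some j => some (off + j)
      | none => none := by
  induction l0 generalizing off d with
  | nil =>
    rw [PySem.List.enumerate_nil, List.foldl_nil]
    by_cases hd : d.contains v = true
    · rw [if_pos hd]
    · rw [if_neg hd]
      have h0 : d.get? v = none := by
        rw [PySem.Dict.get?_eq_none_iff_contains]
        simpa using hd
      rw [h0]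
      split
      · rfl
      · rfl
  | cons x xs ih =>
    rw [PySem.List.enumerate_cons, List.foldl_cons]
    by_cases hvx : v = x
    · subst hvx
      by_cases hSv : PySem.Str.isIn "same" v = true
      · have hg : (!PySem.Str.isIn "same" v && !d.contains v) = false := by
          rw [hSv]; rfl
        rw [hg, if_neg (by simp), ih (off + 1) d]
        have hSv' : hasS v = true := hSv
        by_cases hd : d.contains v = true
        · rw [if_pos hd, if_pos hd]
        · rw [if_neg hd, if_neg hd, if_pos hSv', if_pos hSv']
      · have hSf : PySem.Str.isIn "same" v = false := by simpa using hSv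
        by_cases hd : d.contains v = true
        · have hg : (!PySem.Str.isIn "same" v && !d.contains v) = false := by
            rw [hd]; simp
          rw [hg, if_neg (by simp), ih (off + 1) d, if_pos hd, if_pos hd]
        · have hd' : d.contains v = false := by simpa using hd
          have hg : (!PySem.Str.isIn "same" v && !d.contains v) = true := by
            rw [hSf, hd']; rfl
          rw [hg, if_pos rfl, ih (off + 1) (d.insert v off),
            if_pos (PySem.Dict.contains_insert_self d v off),
            PySem.Dict.get?_insert_self, if_neg hd,
            if_neg (by rw [show hasS v = false from hSf]; simp),
            PySem.List.index?_cons_self]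
          norm_num
    · -- v ≠ x: the step never touches key v, and index? shifts by one
      have hstep : ∀ d1 : PySem.Dict String Int,
          (if !PySem.Str.isIn "same" x && !d1.contains x then d1.insert x off else d1).get? v
            = d1.get? v ∧
          (if !PySem.Str.isIn "same" x && !d1.contains x then d1.insert x off else d1).contains v
            = d1.contains v := by
        intro d1
        split
        · constructor
          · exact PySem.Dict.get?_insert_of_ne d1 off hvx
          · rw [PySem.Dict.contains_insert]
            simp [hvx]
        · exact ⟨rfl, rfl⟩
      rw [ih (off + 1) _, (hstep d).1, (hstep d).2, shift_match xs x v off hvx]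

-- getElem? form of enumerate
lemma enumerate_get? (l : List String) (s : Int) (i : Nat) :
    (PySem.List.enumerate l s)[i]? = Option.map (fun v => (s + i, v)) l[i]? := by
  induction l generalizing s i with
  | nil => simp [PySem.List.enumerate]
  | cons x xs ih =>
    rw [PySem.List.enumerate_cons]
    cases i with
    | zero => simp
    | succ i =>
      simp only [List.getElem?_cons_succ]
      rw [ih (s + 1) i]
      cases xs[i]?
      · simp
      · simp
        ring

lemma sameprefrem_alt_eq_part (l : List String) : sameprefrem_alt l = part l l.length := by
  apply List.ext_getElem?
  intro i
  simp only [sameprefrem_alt]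
  rw [List.getElem?_map, enumerate_get?, part_get?]
  cases hw : l[i]? with
  | none => rfl
  | some w =>
    simp only [Option.map_some]
    congr 1
    rw [build_get? l 0 PySem.Dict.empty w]
    simp only [PySem.Dict.contains_empty, Bool.false_eq_true, if_false]
    by_cases hS : PySem.Str.isIn "same" w = true
    · rw [show (!PySem.Str.isIn "same" w) = false by rw [hS]; rfl, if_neg (by simp)]
      unfold specAt
      rw [if_pos (show hasS w = true from hS)]
    · have hSf : hasS w = false := by simpa [hasS] using hS
      rw [show (!PySem.Str.isIn "same" w) = true by
        rw [show PySem.Str.isIn "same" w = false from hSf]; rfl, if_pos rfl]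
      rw [if_neg (by rw [hSf]; simp)]
      obtain ⟨j, hj⟩ := index?_isSome' l i w hw
      obtain ⟨hjlen, -, -⟩ := PySem.List.getElem_of_index?_eq_some hj
      have hji : j ≤ i := index?_le l i j w hw hj
      rw [hj, specAt_some l l.length i w hSf hj]
      change (if (0 + (j : Int)) ≠ 0 + (i : Int)
        then "same as pref " ++ PySem.Int.toStr (0 + (j : Int) + 1) else w) = _
      by_cases hlt : j < i
      · rw [if_pos (by omega), if_pos ⟨hlt, hjlen⟩]
        unfold repl
        norm_num
      · have hji' : j = i := by omega
        subst hji'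
        rw [if_neg (by omega), if_neg (by omega)]

-- ===== VERDICT (by name: the statement is the Claim_ definition above) =====
theorem sameprefrem_spec : Claim_equal_sameprefrem := by
  intro l _
  unfold Spec_sameprefrem
  rw [sameprefrem_eq_part, sameprefrem_alt_eq_part]
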